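-- pv_equiv track=rewrite | github.com/manuelKrivoy/BingoTP | src/bingo.py | celdas_vacias_consecutivas
-- ===== SOURCE A (Python) =====
-- def celdas_vacias_consecutivas(mi_carton):
--     for fila in mi_carton:
--         contador = 0
--         for celda in fila:
--             if celda != 0:
--                 contador = 0
--             else:
--                 contador += 1
--             if contador == 3:
--                 return False
--     return True
-- ===== SOURCE B (Python) =====
-- def celdas_vacias_consecutivas(mi_carton):
--     # Sliding window of width 3: the board is valid iff no window is all zeros.
--     return all(a != 0 or b != 0 or c != 0
--                for fila in mi_carton
--                for a, b, c in zip(fila, fila[1:], fila[2:]))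
-- ===== Notes on version B (the rewrite author's own statement) =====
-- stated objective: idiomatic
-- what changed: Replaced the stateful consecutive-zero counter with an early return by a declarative sliding-window check: zip each row with its two shifted tails and require every width-3 window to contain a nonzero cell.
import Mathlib
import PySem

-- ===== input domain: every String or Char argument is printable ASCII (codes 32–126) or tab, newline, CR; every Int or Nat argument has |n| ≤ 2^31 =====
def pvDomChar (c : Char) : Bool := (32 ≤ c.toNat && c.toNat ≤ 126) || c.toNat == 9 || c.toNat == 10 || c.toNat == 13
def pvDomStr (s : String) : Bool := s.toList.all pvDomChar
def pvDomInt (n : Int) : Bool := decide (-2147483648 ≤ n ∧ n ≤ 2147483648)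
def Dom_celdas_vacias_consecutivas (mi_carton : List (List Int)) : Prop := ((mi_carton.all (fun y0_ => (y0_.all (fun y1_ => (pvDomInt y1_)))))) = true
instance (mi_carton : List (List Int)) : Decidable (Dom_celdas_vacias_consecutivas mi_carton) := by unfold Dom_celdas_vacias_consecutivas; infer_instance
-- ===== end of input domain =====

-- B replaces A's stateful consecutive-zero counter with a declarative sliding-window
-- check (zip each row with its two shifted tails); objective: idiomatic.

-- ===== PORT A =====
-- inner loop of A: carries the running counter 'contador'; returns true iff the
-- 'return False' statement fires for this row
def pvRowA : List Int → Int → Bool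
  | [], _ => false
  | celda :: rest, contador =>
    let contador' := if celda ≠ 0 then 0 else contador + 1
    if contador' = 3 then true else pvRowA rest contador'

def celdas_vacias_consecutivas (mi_carton : List (List Int)) : Bool :=
  mi_carton.all (fun fila => ! pvRowA fila 0)

-- ===== PORT B =====
-- one width-3 window is fine iff some cell is nonzero
def pvRowB (fila : List Int) : Bool :=
  ((fila.zip (fila.drop 1)).zip (fila.drop 2)).all
    (fun w => decide (w.1.1 ≠ 0) || decide (w.1.2 ≠ 0) || decide (w.2 ≠ 0))

def celdas_vacias_consecutivas_alt (mi_carton : List (List Int)) : Bool :=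
  mi_carton.all pvRowB

-- ===== PRECONDITION & SPEC =====
def Spec_celdas_vacias_consecutivas (mi_carton : List (List Int)) (out : Bool) : Prop := out = celdas_vacias_consecutivas_alt mi_carton
instance (mi_carton : List (List Int)) (out : Bool) : Decidable (Spec_celdas_vacias_consecutivas mi_carton out) := by unfold Spec_celdas_vacias_consecutivas; infer_instance

-- ===== CLAIM (what is proved, stated in full; the proofs are below) =====
def Claim_equal_celdas_vacias_consecutivas : Prop := ∀ (mi_carton : List (List Int)), Dom_celdas_vacias_consecutivas mi_carton → Spec_celdas_vacias_consecutivas mi_carton (celdas_vacias_consecutivas mi_carton)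

-- ===== LEMMAS AND PROOFS =====

-- proof helper: "the row has three consecutive zeros", by structural recursion
def hasWin : List Int → Bool
  | a :: b :: c :: r => (a = 0 && b = 0 && c = 0) || hasWin (b :: c :: r)
  | _ => false

def hz : List Int → Bool
  | a :: _ => a = 0
  | [] => false

def hz2 : List Int → Bool
  | a :: b :: _ => a = 0 && b = 0
  | _ => false

theorem hasWin_cons_of_ne {a : Int} (t : List Int) (h : a ≠ 0) :
    hasWin (a :: t) = hasWin t := by
  match t with
  | [] => simp [hasWin]
  | [b] => simp [hasWin]
  | b :: c :: r => simp [hasWin, h]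

theorem pvRowA_chars (l : List Int) :
    pvRowA l 0 = hasWin l ∧ pvRowA l 1 = (hz2 l || hasWin l) ∧
      pvRowA l 2 = (hz l || hasWin l) := by
  induction l with
  | nil => simp [pvRowA, hasWin, hz, hz2]
  | cons a t ih =>
    obtain ⟨ih0, ih1, ih2⟩ := ih
    by_cases ha : a = 0
    · subst ha
      refine ⟨?_, ?_, ?_⟩
      · show pvRowA (0 :: t) 0 = hasWin (0 :: t)
        simp only [pvRowA]; norm_num
        rw [ih1]
        match t with
        | [] => simp [hasWin, hz2]
        | [b] => simp [hasWin, hz2]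
        | b :: c :: r => by_cases hb : b = 0 <;> by_cases hc : c = 0 <;>
            simp [hasWin, hz2, hb, hc]
      · show pvRowA (0 :: t) 1 = (hz2 (0 :: t) || hasWin (0 :: t))
        simp only [pvRowA]; norm_num
        rw [ih2]
        match t with
        | [] => simp [hasWin, hz, hz2]
        | [b] => simp [hasWin, hz, hz2]
        | b :: c :: r => by_cases hb : b = 0 <;> by_cases hc : c = 0 <;>
            simp [hasWin, hz, hz2, hb, hc]
      · show pvRowA (0 :: t) 2 = (hz (0 :: t) || hasWin (0 :: t))
        simp [pvRowA, hz]
    · have hw := hasWin_cons_of_ne t ha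
      have h2 : hz2 (a :: t) = false := by
        match t with
        | [] => simp [hz2]
        | b :: r => simp [hz2, ha]
      refine ⟨?_, ?_, ?_⟩ <;>
        simp [pvRowA, ha, hw, h2, hz, ih0]

theorem pvRowB_win3 (a b c : Int) (r : List Int) :
    pvRowB (a :: b :: c :: r) =
      ((decide (a ≠ 0) || decide (b ≠ 0) || decide (c ≠ 0)) && pvRowB (b :: c :: r)) := by
  simp [pvRowB, List.zip]

theorem pvRowB_eq_not_hasWin (l : List Int) : pvRowB l = ! hasWin l := by
  match l with
  | [] => simp [pvRowB, hasWin]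
  | [a] => simp [pvRowB, hasWin]
  | [a, b] => simp [pvRowB, hasWin]
  | a :: b :: c :: r =>
    rw [pvRowB_win3, pvRowB_eq_not_hasWin (b :: c :: r)]
    by_cases hA : a = 0 <;> by_cases hB : b = 0 <;> by_cases hC : c = 0 <;>
      simp [hasWin, hA, hB, hC]
  termination_by l.length

theorem row_agree (l : List Int) : (! pvRowA l 0) = pvRowB l := by
  rw [(pvRowA_chars l).1, pvRowB_eq_not_hasWin]

-- ===== VERDICT (by name: the statement is the Claim_ definition above) =====
theorem celdas_vacias_consecutivas_spec : Claim_equal_celdas_vacias_consecutivas := by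
  intro m _
  show celdas_vacias_consecutivas m = celdas_vacias_consecutivas_alt m
  unfold celdas_vacias_consecutivas celdas_vacias_consecutivas_alt
  induction m with
  | nil => rfl
  | cons f t ih => simp [List.all_cons, row_agree]
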